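-- pv_equiv track=rewrite | github.com/ScrollPrize/villa | vesuvius/src/vesuvius/neural_tracing/inference/infer_streamline.py | _rank_batch_assignment_summary
-- ===== SOURCE A (Python) =====
-- def _batch_specs_for_count(item_count, batch_size):
--     item_count = int(item_count)
--     batch_size = int(batch_size)
--     if batch_size <= 0:
--         raise ValueError(f"batch_size must be >= 1, got {batch_size}")
--     return [
--         {
--             "batch_index": batch_index,
--             "start": start,
--             "stop": min(start + batch_size, item_count),
--         }
--         for batch_index, start in enumerate(range(0, item_count, batch_size))
--     ]
--
-- def _assigned_batch_specs(batch_specs, rank, world_size):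
--     rank = int(rank)
--     world_size = int(world_size)
--     if world_size <= 0:
--         raise ValueError(f"world_size must be >= 1, got {world_size}")
--     if rank < 0 or rank >= world_size:
--         raise ValueError(f"rank must be in [0, world_size), got rank={rank}, world_size={world_size}")
--     return [
--         spec
--         for spec in batch_specs
--         if int(spec["batch_index"]) % world_size == rank
--     ]
--
-- def _rank_batch_assignment_summary(total_batches, world_size):
--     batch_specs = _batch_specs_for_count(total_batches, 1)
--     return {
--         str(rank): [
--             int(spec["batch_index"])
--             for spec in _assigned_batch_specs(batch_specs, rank, world_size)
--         ]
--         for rank in range(int(world_size))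
--     }
-- ===== SOURCE B (Python) =====
-- def _rank_batch_assignment_summary(total_batches, world_size):
--     total_batches = int(total_batches)
--     world_size = int(world_size)
--     buckets = [[] for _ in range(world_size)]
--     if world_size > 0:
--         for i in range(total_batches):
--             buckets[i % world_size].append(i)
--     return {str(rank): bucket for rank, bucket in enumerate(buckets)}
-- ===== Notes on version B (the rewrite author's own statement) =====
-- stated objective: faster
-- what changed: replaces the per-rank rescans of the full batch-spec list (and the spec-dict construction) with a single pass that appends each index i to bucket i % world_size, stringifying the rank keys once at the end
import Mathlib
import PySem

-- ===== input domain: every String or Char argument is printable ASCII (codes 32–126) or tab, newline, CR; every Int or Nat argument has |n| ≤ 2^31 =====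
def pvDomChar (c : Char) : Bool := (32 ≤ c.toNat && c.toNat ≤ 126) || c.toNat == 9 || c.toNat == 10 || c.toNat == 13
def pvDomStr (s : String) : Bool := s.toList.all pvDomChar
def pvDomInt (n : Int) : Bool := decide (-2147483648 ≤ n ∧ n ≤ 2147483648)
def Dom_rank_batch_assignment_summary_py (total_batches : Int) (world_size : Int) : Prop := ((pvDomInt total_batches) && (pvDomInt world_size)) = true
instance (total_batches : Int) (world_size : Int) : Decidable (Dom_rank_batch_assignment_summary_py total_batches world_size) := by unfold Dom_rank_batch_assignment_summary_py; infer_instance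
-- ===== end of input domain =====

-- B replaces A's per-rank rescans of the batch-spec list with one bucket pass over the indices (faster).


-- ===== PORT A =====
-- each spec dict {"batch_index": b, "start": s, "stop": t} has fixed string keys and Int
-- values; it is modelled as the triple (b, s, t)
def pvBatchSpecsForCount (item_count : Int) (batch_size : Int) : List (Int × Int × Int) :=
  if batch_size ≤ 0 then []  -- Python raises ValueError here; A only calls with batch_size = 1
  else (PySem.List.enumerate (PySem.List.pyRange 0 item_count batch_size) 0).map
    (fun p => (p.1, p.2, min (p.2 + batch_size) item_count))

def pvAssignedBatchSpecs (batch_specs : List (Int × Int × Int)) (rank : Int) (world_size : Int) : List (Int × Int × Int) :=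
  if world_size ≤ 0 then []  -- Python raises ValueError; unreachable from A's call sites
  else if rank < 0 ∨ world_size ≤ rank then []  -- Python raises ValueError; unreachable from A's call sites
  else batch_specs.filter (fun spec => PySem.Int.mod spec.1 world_size == rank)

-- the dict-comprehension keys str(rank) are pairwise distinct, so the dict is this assoc list
def rank_batch_assignment_summary_py (total_batches : Int) (world_size : Int) : List (String × List Int) :=
  let batch_specs := pvBatchSpecsForCount total_batches 1
  (PySem.List.pyRange 0 world_size 1).map
    (fun rank => (PySem.Int.toStr rank,
      (pvAssignedBatchSpecs batch_specs rank world_size).map (fun spec => spec.1)))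

-- ===== PORT B =====
def rank_batch_assignment_summary_py_alt (total_batches : Int) (world_size : Int) : List (String × List Int) :=
  let buckets0 : List (List Int) := (PySem.List.pyRange 0 world_size 1).map (fun _ => ([] : List Int))
  let buckets :=
    if 0 < world_size then
      (PySem.List.pyRange 0 total_batches 1).foldl
        (fun bs i =>
          -- buckets[i % world_size].append(i): the index i % world_size is in range, so
          -- pyGetD/pySetD are exact here
          PySem.List.pySetD bs (PySem.Int.mod i world_size)
            (PySem.List.pyGetD bs (PySem.Int.mod i world_size) [] ++ [i]))
        buckets0
    else buckets0
  (PySem.List.enumerate buckets 0).map (fun p => (PySem.Int.toStr p.1, p.2))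

-- ===== PRECONDITION & SPEC =====
def Spec_rank_batch_assignment_summary_py (total_batches : Int) (world_size : Int) (out : List (String × List Int)) : Prop := out = rank_batch_assignment_summary_py_alt total_batches world_size
instance (total_batches : Int) (world_size : Int) (out : List (String × List Int)) : Decidable (Spec_rank_batch_assignment_summary_py total_batches world_size out) := by unfold Spec_rank_batch_assignment_summary_py; infer_instance

-- ===== CLAIM (what is proved, stated in full; the proofs are below) =====
def Claim_equal_rank_batch_assignment_summary_py : Prop := ∀ (total_batches : Int) (world_size : Int), Dom_rank_batch_assignment_summary_py total_batches world_size → Spec_rank_batch_assignment_summary_py total_batches world_size (rank_batch_assignment_summary_py total_batches world_size)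

-- ===== LEMMAS AND PROOFS =====

-- the canonical value both sides compute, per rank r: the indices ≡ r (mod world_size)
def pvBuckets (L : List Int) (ws : Int) : List (List Int) :=
  (PySem.List.pyRange 0 ws 1).map (fun r => L.filter (fun i => PySem.Int.mod i ws == r))

lemma pyRange_zero_toNat (b : Int) : PySem.List.pyRange 0 ((b.toNat : Int)) 1 = PySem.List.pyRange 0 b 1 := by
  simp only [PySem.List.pyRange_one]
  have h : (((b.toNat : Int)) - 0).toNat = (b - 0).toNat := by omega
  rw [h]

lemma fst_batch_specs (tb : Int) :
    (pvBatchSpecsForCount tb 1).map (fun spec => spec.1) = PySem.List.pyRange 0 tb 1 := by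
  simp [pvBatchSpecsForCount, List.map_map, Function.comp_def, PySem.List.map_fst_enumerate]
  simpa using pyRange_zero_toNat tb

lemma pvBuckets_step (L : List Int) (ws i : Int) (hws : 0 < ws) :
    PySem.List.pySetD (pvBuckets L ws) (PySem.Int.mod i ws)
      (PySem.List.pyGetD (pvBuckets L ws) (PySem.Int.mod i ws) [] ++ [i])
    = pvBuckets (L ++ [i]) ws := by
  have hm0 : 0 ≤ PySem.Int.mod i ws := PySem.Int.mod_nonneg i hws
  have hmlt : PySem.Int.mod i ws < ws := PySem.Int.mod_lt i hws
  set m := PySem.Int.mod i ws with hm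
  rw [PySem.List.pySetD_of_nonneg _ _ hm0]
  rw [pvBuckets, PySem.List.pyGetD_map_pyRange_of_nonneg _ ws m [] hm0 hmlt]
  apply List.ext_getElem
  · simp [pvBuckets]
  · intro k hk hk'
    have hkws : k < ws.toNat := by
      simpa [pvBuckets, PySem.List.length_pyRange_one] using hk'
    have hrk : (PySem.List.pyRange 0 ws 1)[k]'(by simp [PySem.List.length_pyRange_one]; omega) = (k : Int) := by
      rw [PySem.List.getElem_pyRange_one]; ring
    by_cases hkm : k = m.toNat
    · have hkm' : (k : Int) = m := by omega
      have h3 : (PySem.Int.mod i ws == m) = true := by simp [hm]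
      simp [pvBuckets, hkm, List.getElem_map, List.filter_append,
        max_eq_left hm0, h3, List.filter_singleton]
    · have h1 : ¬ m.toNat = k := fun h => hkm h.symm
      have h2 : (PySem.Int.mod i ws == (k : Int)) = false := by
        simp [← hm]; omega
      simp [pvBuckets, List.getElem_map, hrk, List.filter_append, h1, h2,
        List.filter_singleton]

lemma pvBuckets_fold (ws : Int) (hws : 0 < ws) (L : List Int) :
    L.foldl
      (fun bs i =>
        PySem.List.pySetD bs (PySem.Int.mod i ws)
          (PySem.List.pyGetD bs (PySem.Int.mod i ws) [] ++ [i]))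
      (pvBuckets [] ws)
    = pvBuckets L ws := by
  induction L using List.reverseRecOn with
  | nil => rfl
  | append_singleton L i ih =>
    rw [List.foldl_append, List.foldl_cons, List.foldl_nil, ih, pvBuckets_step L ws i hws]

-- ===== VERDICT (by name: the statement is the Claim_ definition above) =====
theorem rank_batch_assignment_summary_py_spec : Claim_equal_rank_batch_assignment_summary_py := by
  intro tb ws _
  show rank_batch_assignment_summary_py tb ws = rank_batch_assignment_summary_py_alt tb ws
  by_cases hws : 0 < ws
  · -- A's side: per-rank filter of the batch indices
    have hA : rank_batch_assignment_summary_py tb ws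
        = (PySem.List.pyRange 0 ws 1).map
            (fun r => (PySem.Int.toStr r,
              (PySem.List.pyRange 0 tb 1).filter (fun i => PySem.Int.mod i ws == r))) := by
      unfold rank_batch_assignment_summary_py
      apply List.map_congr_left
      intro r hr
      have hb := (PySem.List.mem_pyRange_one).1 hr
      unfold pvAssignedBatchSpecs
      rw [if_neg (by omega), if_neg (by omega)]
      rw [← fst_batch_specs tb, List.filter_map]
      rfl
    -- B's side: the bucket fold computes pvBuckets, and enumerate re-attaches the ranks
    have hinit : (PySem.List.pyRange 0 ws 1).map (fun _ => ([] : List Int)) = pvBuckets [] ws := by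
      simp [pvBuckets]
    have hB : rank_batch_assignment_summary_py_alt tb ws
        = (PySem.List.enumerate (pvBuckets (PySem.List.pyRange 0 tb 1) ws) 0).map
            (fun p => (PySem.Int.toStr p.1, p.2)) := by
      unfold rank_batch_assignment_summary_py_alt
      dsimp only
      rw [if_pos hws, hinit, pvBuckets_fold ws hws]
    rw [hA, hB]
    rw [PySem.List.enumerate_eq_map_pyRange _ ([] : List Int)]
    have hlen : ((PySem.List.len (pvBuckets (PySem.List.pyRange 0 tb 1) ws)) : Int) = ((ws.toNat : Nat) : Int) := by
      simp [pvBuckets, PySem.List.length_pyRange_one]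
    rw [hlen, pyRange_zero_toNat, List.map_map]
    apply List.map_congr_left
    intro r hr
    have hb := (PySem.List.mem_pyRange_one).1 hr
    simp only [Function.comp_def]
    rw [pvBuckets, PySem.List.pyGetD_map_pyRange_of_nonneg _ ws r [] (by omega) (by omega)]
  · -- world_size ≤ 0: both sides are the empty dict
    unfold rank_batch_assignment_summary_py rank_batch_assignment_summary_py_alt
    rw [PySem.List.pyRange_one_eq_nil (by omega)]
    simp [hws]
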